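-- pv_equiv track=rewrite | github.com/eugendimant/software-spanish-learning | pages/conversation.py | generate_colleague_response
-- ===== SOURCE A (Python) =====
-- def generate_colleague_response(user_message: str, turn: int, context: list, templates: dict) -> str:
--     """Generate response for colleague/coworker scenarios."""
--     user_lower = user_message.lower()
--
--     if turn == 0:
--         if any(word in user_lower for word in ["plazo", "tiempo", "retraso", "tarde"]):
--             return "Ya, es que tuve unos imprevistos. Sabes que no suelo retrasarme."
--         elif any(word in user_lower for word in ["problema", "preocupa", "hablar"]):
--             return "Claro, dimme. Que pasa?"
--         else:
--             return "Si, lo se. Estoy un poco agobiado con todo."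
--
--     elif turn == 1:
--         if any(word in user_lower for word in ["entiendo", "comprendo", "se que"]):
--             return "Gracias por entenderlo. La verdad es que ha sido complicado."
--         elif any(word in user_lower for word in ["pero", "necesito", "importante"]):
--             return "Tienes razon. Que propones? Como lo solucionamos?"
--         else:
--             return "Mira, puedo intentar tenerlo listo para el viernes. Te parece?"
--
--     elif turn == 2:
--         if any(word in user_lower for word in ["seria posible", "podria", "tal vez"]):
--             return "Me parece razonable. Dejame ver como reorganizo mi agenda."
--         elif any(word in user_lower for word in ["ayuda", "apoyo", "echarte una mano"]):
--             return "Te lo agradeceria mucho. Con algo de ayuda puedo adelantarlo."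
--         else:
--             return "Vale, me comprometo a tenerlo listo. Te aviso en cuanto lo tenga."
--
--     else:
--         return "Perfecto, quedamos asi entonces. Gracias por hablarlo conmigo."
-- ===== SOURCE B (Python) =====
-- # One flat priority table; the answer is computed by a reverse fold (no early
-- # return, no per-turn nesting): later table rows are applied first and earlier
-- # (higher-priority) matching rows overwrite them, so the first matching row wins.
-- _FINAL = "Perfecto, quedamos asi entonces. Gracias por hablarlo conmigo."
--
-- _TABLE = [
--     (0, ["plazo", "tiempo", "retraso", "tarde"],
--      "Ya, es que tuve unos imprevistos. Sabes que no suelo retrasarme."),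
--     (0, ["problema", "preocupa", "hablar"],
--      "Claro, dimme. Que pasa?"),
--     (0, None,
--      "Si, lo se. Estoy un poco agobiado con todo."),
--     (1, ["entiendo", "comprendo", "se que"],
--      "Gracias por entenderlo. La verdad es que ha sido complicado."),
--     (1, ["pero", "necesito", "importante"],
--      "Tienes razon. Que propones? Como lo solucionamos?"),
--     (1, None,
--      "Mira, puedo intentar tenerlo listo para el viernes. Te parece?"),
--     (2, ["seria posible", "podria", "tal vez"],
--      "Me parece razonable. Dejame ver como reorganizo mi agenda."),
--     (2, ["ayuda", "apoyo", "echarte una mano"],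
--      "Te lo agradeceria mucho. Con algo de ayuda puedo adelantarlo."),
--     (2, None,
--      "Vale, me comprometo a tenerlo listo. Te aviso en cuanto lo tenga."),
-- ]
--
--
-- def generate_colleague_response(user_message: str, turn: int, context: list, templates: dict) -> str:
--     """Generate response for colleague/coworker scenarios."""
--     user_lower = user_message.lower()
--     result = _FINAL
--     for t, words, response in reversed(_TABLE):
--         if t == turn and (words is None or any(w in user_lower for w in words)):
--             result = response
--     return result
-- ===== Notes on version B (the rewrite author's own statement) =====
-- stated objective: alternative
-- what changed: Replaced the three-level if/elif early-return chain with one flat 9-row priority table folded in reverse with an accumulator: every row is visited, a matching row overwrites the accumulator, so the highest-priority match survives; no branching on the turn and no early return.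
import Mathlib
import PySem

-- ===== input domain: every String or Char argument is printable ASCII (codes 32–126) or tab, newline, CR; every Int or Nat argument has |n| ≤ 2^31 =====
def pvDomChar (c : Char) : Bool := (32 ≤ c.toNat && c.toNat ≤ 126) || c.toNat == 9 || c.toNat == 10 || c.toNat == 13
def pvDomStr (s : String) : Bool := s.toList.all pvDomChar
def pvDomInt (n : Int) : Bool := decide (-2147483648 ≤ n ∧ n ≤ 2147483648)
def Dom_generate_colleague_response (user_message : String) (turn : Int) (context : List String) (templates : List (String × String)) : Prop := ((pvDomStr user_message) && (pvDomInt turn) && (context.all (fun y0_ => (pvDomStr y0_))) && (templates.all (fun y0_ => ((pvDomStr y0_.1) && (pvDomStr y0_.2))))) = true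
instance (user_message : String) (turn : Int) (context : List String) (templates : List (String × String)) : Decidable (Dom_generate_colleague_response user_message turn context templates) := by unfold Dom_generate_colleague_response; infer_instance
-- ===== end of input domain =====

-- B replaces A's if/elif early-return chain with one flat 9-row priority table folded in reverse (later rows applied first, matching rows overwrite), same result.


-- ===== PORT A =====
def generate_colleague_response (user_message : String) (turn : Int) (context : List String) (templates : List (String × String)) : String :=
  let user_lower := PySem.Str.lower user_message
  if turn == 0 then
    if ["plazo", "tiempo", "retraso", "tarde"].any (fun word => PySem.Str.isIn word user_lower) then
      "Ya, es que tuve unos imprevistos. Sabes que no suelo retrasarme."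
    else if ["problema", "preocupa", "hablar"].any (fun word => PySem.Str.isIn word user_lower) then
      "Claro, dimme. Que pasa?"
    else
      "Si, lo se. Estoy un poco agobiado con todo."
  else if turn == 1 then
    if ["entiendo", "comprendo", "se que"].any (fun word => PySem.Str.isIn word user_lower) then
      "Gracias por entenderlo. La verdad es que ha sido complicado."
    else if ["pero", "necesito", "importante"].any (fun word => PySem.Str.isIn word user_lower) then
      "Tienes razon. Que propones? Como lo solucionamos?"
    else
      "Mira, puedo intentar tenerlo listo para el viernes. Te parece?"
  else if turn == 2 then
    if ["seria posible", "podria", "tal vez"].any (fun word => PySem.Str.isIn word user_lower) then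
      "Me parece razonable. Dejame ver como reorganizo mi agenda."
    else if ["ayuda", "apoyo", "echarte una mano"].any (fun word => PySem.Str.isIn word user_lower) then
      "Te lo agradeceria mucho. Con algo de ayuda puedo adelantarlo."
    else
      "Vale, me comprometo a tenerlo listo. Te aviso en cuanto lo tenga."
  else
    "Perfecto, quedamos asi entonces. Gracias por hablarlo conmigo."

-- ===== PORT B =====
def pvFinal : String := "Perfecto, quedamos asi entonces. Gracias por hablarlo conmigo."

-- the flat priority table _TABLE of Source B: (turn, keyword group or none = fallback, response)
def pvTable : List (Int × Option (List String) × String) :=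
  [ (0, some ["plazo", "tiempo", "retraso", "tarde"],
       "Ya, es que tuve unos imprevistos. Sabes que no suelo retrasarme."),
    (0, some ["problema", "preocupa", "hablar"],
       "Claro, dimme. Que pasa?"),
    (0, none,
       "Si, lo se. Estoy un poco agobiado con todo."),
    (1, some ["entiendo", "comprendo", "se que"],
       "Gracias por entenderlo. La verdad es que ha sido complicado."),
    (1, some ["pero", "necesito", "importante"],
       "Tienes razon. Que propones? Como lo solucionamos?"),
    (1, none,
       "Mira, puedo intentar tenerlo listo para el viernes. Te parece?"),
    (2, some ["seria posible", "podria", "tal vez"],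
       "Me parece razonable. Dejame ver como reorganizo mi agenda."),
    (2, some ["ayuda", "apoyo", "echarte una mano"],
       "Te lo agradeceria mucho. Con algo de ayuda puedo adelantarlo."),
    (2, none,
       "Vale, me comprometo a tenerlo listo. Te aviso en cuanto lo tenga.") ]

-- Source B's reverse fold: every row is visited; a matching row overwrites the accumulator,
-- so the earliest (highest-priority) matching row determines the final value
def generate_colleague_response_alt (user_message : String) (turn : Int) (context : List String) (templates : List (String × String)) : String :=
  let user_lower := PySem.Str.lower user_message
  pvTable.reverse.foldl
    (fun result row =>
      if row.1 == turn &&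
         (match row.2.1 with
          | none => true
          | some words => words.any (fun w => PySem.Str.isIn w user_lower)) then
        row.2.2
      else result)
    pvFinal

-- ===== PRECONDITION & SPEC =====
def Spec_generate_colleague_response (user_message : String) (turn : Int) (context : List String) (templates : List (String × String)) (out : String) : Prop := out = generate_colleague_response_alt user_message turn context templates
instance (user_message : String) (turn : Int) (context : List String) (templates : List (String × String)) (out : String) : Decidable (Spec_generate_colleague_response user_message turn context templates out) := by unfold Spec_generate_colleague_response; infer_instance

-- ===== CLAIM (what is proved, stated in full; the proofs are below) =====
def Claim_equal_generate_colleague_response : Prop := ∀ (user_message : String) (turn : Int) (context : List String) (templates : List (String × String)), Dom_generate_colleague_response user_message turn context templates → Spec_generate_colleague_response user_message turn context templates (generate_colleague_response user_message turn context templates)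

-- ===== LEMMAS AND PROOFS =====

-- ===== VERDICT (by name: the statement is the Claim_ definition above) =====
theorem generate_colleague_response_spec : Claim_equal_generate_colleague_response := by
  intro user_message turn context templates _
  unfold Spec_generate_colleague_response generate_colleague_response generate_colleague_response_alt
  simp only [pvTable, pvFinal, List.reverse, List.reverseAux, List.foldl]
  by_cases h0 : turn = 0
  · subst h0
    by_cases hA : ["plazo", "tiempo", "retraso", "tarde"].any (fun word => PySem.Str.isIn word (PySem.Str.lower user_message)) <;>
      by_cases hB : ["problema", "preocupa", "hablar"].any (fun word => PySem.Str.isIn word (PySem.Str.lower user_message)) <;>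
      simp [hA, hB]
  · by_cases h1 : turn = 1
    · subst h1
      by_cases hA : ["entiendo", "comprendo", "se que"].any (fun word => PySem.Str.isIn word (PySem.Str.lower user_message)) <;>
        by_cases hB : ["pero", "necesito", "importante"].any (fun word => PySem.Str.isIn word (PySem.Str.lower user_message)) <;>
        simp [hA, hB]
    · by_cases h2 : turn = 2
      · subst h2
        by_cases hA : ["seria posible", "podria", "tal vez"].any (fun word => PySem.Str.isIn word (PySem.Str.lower user_message)) <;>
          by_cases hB : ["ayuda", "apoyo", "echarte una mano"].any (fun word => PySem.Str.isIn word (PySem.Str.lower user_message)) <;>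
          simp [hA, hB]
      · simp [h0, h1, h2, Ne.symm h0, Ne.symm h1, Ne.symm h2]
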